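-- pv_equiv track=rewrite | github.com/Mariachiar/Spatiotemporal-Deepfake-Detection-for-Live-Video-Calls | dualrun/cli/test.py | parse_ids_from_clip_dir
-- ===== SOURCE A (Python) =====
-- from typing import List, Tuple, Dict, Any
--
-- def parse_ids_from_clip_dir(clip_dir: str) -> Tuple[str,str,str]:
--     p = clip_dir.replace("\\","/").rstrip("/")
--     parts = p.split("/")
--     track_idx = None; clip_idx = None
--     for i,s in enumerate(parts):
--         if s.startswith("track_"): track_idx = i
--         if s.startswith("clip_"):  clip_idx = i
--     if track_idx is None: raise ValueError(f"track_* non trovato: {clip_dir}")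
--     video_id = "/".join(parts[:track_idx])
--     track_id = "/".join(parts[:track_idx+1])
--     clip_id  = "/".join(parts[:clip_idx+1]) if clip_idx is not None else clip_dir
--     return video_id, track_id, clip_id
-- ===== SOURCE B (Python) =====
-- def parse_ids_from_clip_dir(clip_dir: str):
--     # Work on the flat normalized string: no split into components at all.
--     # Prepending "/" makes "component starts with X" the same as "the string
--     # contains /X", so one rfind locates the last such component directly.
--     p = clip_dir.replace("\\", "/").rstrip("/")
--     q = "/" + p
--     ti = q.rfind("/track_")          # start index of the last track_* component in p
--     if ti < 0:
--         raise ValueError(f"track_* non trovato: {clip_dir}")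
--     video_id = p[:ti - 1] if ti > 0 else ""
--     j = p.find("/", ti)              # end of that component
--     track_id = p if j < 0 else p[:j]
--     ci = q.rfind("/clip_")
--     if ci < 0:
--         clip_id = clip_dir
--     else:
--         k = p.find("/", ci)
--         clip_id = p if k < 0 else p[:k]
--     return video_id, track_id, clip_id
-- ===== Notes on version B (the rewrite author's own statement) =====
-- stated objective: alternative
-- what changed: A splits the path into components and scans them with a fused forward loop; B never builds the component list: it prepends a '/' sentinel to the normalized string and locates the last track_/clip_ component with one rfind of '/track_'//'/clip_' on the flat string, then slices by character index using str.find for the component end.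
import Mathlib
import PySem

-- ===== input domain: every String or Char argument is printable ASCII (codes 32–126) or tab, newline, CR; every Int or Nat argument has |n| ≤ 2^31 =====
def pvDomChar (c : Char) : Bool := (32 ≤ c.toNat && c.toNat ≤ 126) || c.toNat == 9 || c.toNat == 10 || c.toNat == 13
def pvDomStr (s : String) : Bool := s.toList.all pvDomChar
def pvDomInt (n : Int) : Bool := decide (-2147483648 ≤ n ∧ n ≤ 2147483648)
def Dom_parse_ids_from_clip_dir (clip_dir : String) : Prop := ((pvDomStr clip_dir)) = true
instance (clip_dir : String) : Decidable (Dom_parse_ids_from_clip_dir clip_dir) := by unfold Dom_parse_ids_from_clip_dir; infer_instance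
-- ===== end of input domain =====

-- B abandons A's split-into-components scan entirely: it works on the flat normalized string,
-- locating the last track_/clip_ component with one rfind on a '/'-sentinel-prefixed string
-- and slicing by character index (alternative algorithm, same cost).


-- ===== PORT A =====
-- p = clip_dir.replace("\\","/").rstrip("/") — rstrip("/") ported by hand (drop trailing '/'
-- chars), exact since the strip set is the single char '/'.
def pvNorm (clip_dir : String) : String :=
  String.ofList (((PySem.Str.replace clip_dir "\\" "/").toList.reverse.dropWhile (· == '/')).reverse)

-- parts = p.split("/"); split? with nonempty separator is always `some`, `.getD []` is a guard.
def pvParts (clip_dir : String) : List String :=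
  (PySem.Str.split? (pvNorm clip_dir) "/").getD []

def parse_ids_from_clip_dir (clip_dir : String) : String × String × String :=
  let parts := pvParts clip_dir
  let st := (PySem.List.enumerate parts).foldl
    (fun (acc : Option Int × Option Int) is =>
      (if PySem.Str.startswith is.2 "track_" then some is.1 else acc.1,
       if PySem.Str.startswith is.2 "clip_" then some is.1 else acc.2))
    (none, none)
  match st.1 with
  | none => ("", "", "")   -- Python raises ValueError here; excluded by Pre_
  | some ti =>
    (PySem.Str.join "/" (PySem.List.slice parts none (some ti)),
     PySem.Str.join "/" (PySem.List.slice parts none (some (ti + 1))),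
     match st.2 with
     | some ci => PySem.Str.join "/" (PySem.List.slice parts none (some (ci + 1)))
     | none => clip_dir)

-- ===== PORT B =====
-- Source B works on the flat normalized string p: q = "/" + p (kept as a char list, exact since
-- ("/" ++ p).toList = '/' :: p.toList), ti = q.rfind("/track_"), then slices p[:...] directly.
def parse_ids_from_clip_dir_alt (clip_dir : String) : String × String × String :=
  let p := pvNorm clip_dir
  let q := '/' :: p.toList
  let ti := PySem.Chars.rfind q "/track_".toList
  if ti < 0 then ("", "", "")   -- Python raises ValueError here; excluded by Pre_
  else
    let video := if ti > 0 then String.ofList (PySem.List.slice p.toList none (some (ti - 1))) else ""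
    let j := PySem.Chars.findFrom p.toList "/".toList ti none
    let track := if j < 0 then p else String.ofList (PySem.List.slice p.toList none (some j))
    let ci := PySem.Chars.rfind q "/clip_".toList
    let clip :=
      if ci < 0 then clip_dir
      else
        let k := PySem.Chars.findFrom p.toList "/".toList ci none
        if k < 0 then p else String.ofList (PySem.List.slice p.toList none (some k))
    (video, track, clip)

-- ===== PRECONDITION & SPEC =====
-- Pre_ excludes exactly the inputs whose normalized path has no "track_*" component: there
-- Python A raises ValueError (and B raises the same ValueError).
def Pre_parse_ids_from_clip_dir (clip_dir : String) : Prop :=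
  (pvParts clip_dir).any (fun s => PySem.Str.startswith s "track_") = true
instance (clip_dir : String) : Decidable (Pre_parse_ids_from_clip_dir clip_dir) := by unfold Pre_parse_ids_from_clip_dir; infer_instance
def pvWitness_parse_ids_from_clip_dir : String := "vid1/track_3/clip_7"

def Spec_parse_ids_from_clip_dir (clip_dir : String) (out : String × String × String) : Prop := out = parse_ids_from_clip_dir_alt clip_dir
instance (clip_dir : String) (out : String × String × String) : Decidable (Spec_parse_ids_from_clip_dir clip_dir out) := by unfold Spec_parse_ids_from_clip_dir; infer_instance

-- ===== CLAIM (what is proved, stated in full; the proofs are below) =====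
def Claim_equal_parse_ids_from_clip_dir : Prop := ∀ (clip_dir : String), Dom_parse_ids_from_clip_dir clip_dir → Pre_parse_ids_from_clip_dir clip_dir → Spec_parse_ids_from_clip_dir clip_dir (parse_ids_from_clip_dir clip_dir)

-- ===== LEMMAS AND PROOFS =====

-- ---------- the single-char split of the normalized string, characterized structurally ----------
def pvJ (ps : List (List Char)) : List Char := List.intercalate ['/'] ps

def pvGs : List Char → List Char → List (List Char)
  | [], cur => [cur.reverse]
  | c :: rest, cur => if c = '/' then cur.reverse :: pvGs rest [] else pvGs rest (c :: cur)

theorem pvGs_ne_nil (l cur : List Char) : pvGs l cur ≠ [] := by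
  induction l generalizing cur with
  | nil => simp [pvGs]
  | cons c rest ih => by_cases h : c = '/' <;> simp [pvGs, h] <;> exact ih _

theorem pvJ_cons (a : List Char) (ps : List (List Char)) (h : ps ≠ []) :
    pvJ (a :: ps) = a ++ '/' :: pvJ ps := by
  cases ps with
  | nil => exact absurd rfl h
  | cons b t => simp [pvJ, List.intercalate, List.intersperse]

theorem pvJ_single (a : List Char) : pvJ [a] = a := by
  simp [pvJ, List.intercalate]

theorem pvGs_join (l cur : List Char) : pvJ (pvGs l cur) = cur.reverse ++ l := by
  induction l generalizing cur with
  | nil => simp [pvGs, pvJ, List.intercalate]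
  | cons c rest ih =>
    by_cases h : c = '/'
    · subst h
      rw [pvGs, if_pos rfl, pvJ_cons _ _ (pvGs_ne_nil rest []), ih]
      simp
    · rw [pvGs, if_neg h, ih]
      simp

theorem pvGs_free (l : List Char) : ∀ (cur piece : List Char), '/' ∉ cur → piece ∈ pvGs l cur →
    '/' ∉ piece := by
  induction l with
  | nil =>
    intro cur piece hc hm
    simp [pvGs] at hm
    subst hm; simpa using hc
  | cons c rest ih =>
    intro cur piece hc hm
    by_cases h : c = '/'
    · subst h
      rw [pvGs, if_pos rfl] at hm
      rcases List.mem_cons.mp hm with h1 | h1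
      · subst h1; simpa using hc
      · exact ih _ _ (by simp) h1
    · rw [pvGs, if_neg h] at hm
      exact ih _ _ (by simp [hc, Ne.symm h]) hm

theorem pvGo_eq (l : List Char) : ∀ (fuel : Nat) (cur : List Char) (acc : List (List Char)),
    l.length ≤ fuel →
    PySem.Chars.splitOn.go ['/'] fuel l cur acc = acc.reverse ++ pvGs l cur := by
  induction l with
  | nil =>
    intro fuel cur acc _
    cases fuel <;> simp [PySem.Chars.splitOn.go, pvGs]
  | cons c rest ih =>
    intro fuel cur acc h
    cases fuel with
    | zero => simp at h
    | succ f =>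
      have hle : rest.length ≤ f := by simp at h; omega
      simp only [PySem.Chars.splitOn.go]
      by_cases hc : c = '/'
      · subst hc
        have hp : List.isPrefixOf ['/'] ('/' :: rest) = true := by simp [List.isPrefixOf]
        rw [if_pos hp]
        simp only [List.length_singleton, List.drop_one, List.tail_cons]
        rw [ih f [] (cur.reverse :: acc) hle]
        simp [pvGs]
      · have hp : List.isPrefixOf ['/'] (c :: rest) = false := by
          simp [List.isPrefixOf]
          exact fun hh => absurd hh.symm hc
        rw [if_neg (by simp [hp])]
        rw [ih f (c :: cur) acc hle]
        simp [pvGs, hc]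

theorem pvSplitOn_eq (cs : List Char) : PySem.Chars.splitOn cs ['/'] = pvGs cs [] := by
  have h := pvGo_eq cs (cs.length + 1) [] [] (by omega)
  simpa [PySem.Chars.splitOn] using h

-- ---------- rfind characterized as "greatest prefix position" ----------
theorem pvRgo_none (s sub : List Char) :
    ∀ n, (∀ j, j ≤ n → sub.isPrefixOf (s.drop j) = false) → PySem.Chars.rfind.go s sub n = -1 := by
  intro n
  induction n with
  | zero =>
    intro h
    have h0 := h 0 le_rfl
    rw [List.drop_zero] at h0
    simp [PySem.Chars.rfind.go, h0]
  | succ k ih =>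
    intro h
    have hk := h (k + 1) le_rfl
    simp [PySem.Chars.rfind.go, hk]
    exact ih (fun j hj => h j (by omega))

theorem pvRgo_some (s sub : List Char) (m : Nat)
    (hp : sub.isPrefixOf (s.drop m) = true) :
    ∀ n, m ≤ n → (∀ j, m < j → j ≤ n → sub.isPrefixOf (s.drop j) = false) →
      PySem.Chars.rfind.go s sub n = m := by
  intro n
  induction n with
  | zero =>
    intro hm _
    interval_cases m
    simp [PySem.Chars.rfind.go] at hp ⊢
    simpa using hp
  | succ k ih =>
    intro hm h
    rcases Nat.lt_or_ge m (k + 1) with hlt | hge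
    · have hk := h (k + 1) hlt le_rfl
      simp [PySem.Chars.rfind.go, hk]
      exact ih (by omega) (fun j h1 h2 => h j h1 (by omega))
    · have : m = k + 1 := by omega
      subst this
      simp [PySem.Chars.rfind.go, hp]

-- ---------- component positions in the joined string ----------
def pvPos : List (List Char) → Nat → Nat
  | _, 0 => 0
  | [], _ + 1 => 0
  | x :: t, i + 1 => x.length + 1 + pvPos t i

def pvLastIdx : List (List Char) → List Char → Option Nat
  | [], _ => none
  | x :: t, pre =>
    match pvLastIdx t pre with
    | some i => some (i + 1)
    | none => if pre.isPrefixOf x then some 0 else none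

theorem pvLastIdx_concat (ys : List (List Char)) (x pre : List Char) :
    pvLastIdx (ys ++ [x]) pre =
      if pre.isPrefixOf x then some ys.length else pvLastIdx ys pre := by
  induction ys with
  | nil => by_cases h : pre.isPrefixOf x <;> simp [pvLastIdx, h]
  | cons y t ih =>
    by_cases h : pre.isPrefixOf x
    · simp [pvLastIdx, ih, h]
    · simp only [List.cons_append, pvLastIdx, ih, if_neg h]

theorem pvLastIdx_lt (ps : List (List Char)) (pre : List Char) (i : Nat)
    (h : pvLastIdx ps pre = some i) : i < ps.length := by
  induction ps generalizing i with
  | nil => simp [pvLastIdx] at h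
  | cons x t ih =>
    simp only [pvLastIdx] at h
    simp only [List.length_cons]
    cases ht : pvLastIdx t pre with
    | some k =>
      rw [ht] at h
      have := ih k ht
      simp at h
      omega
    | none =>
      rw [ht] at h
      by_cases hx : pre.isPrefixOf x <;> simp [hx] at h
      omega

theorem pvPos_le (ps : List (List Char)) (i : Nat) (h : i < ps.length) :
    pvPos ps i ≤ (pvJ ps).length := by
  induction ps generalizing i with
  | nil => simp at h
  | cons x t ih =>
    cases i with
    | zero => simp [pvPos]
    | succ k =>
      have hk : k < t.length := by simp at h; omega
      have ht : t ≠ [] := by intro e; subst e; simp at hk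
      rw [pvJ_cons x t ht]
      simp only [pvPos, List.length_append, List.length_cons]
      have := ih k hk
      omega

theorem pvJ_take_drop (ps : List (List Char)) (i : Nat) (h0 : 0 < i) (h : i < ps.length) :
    pvJ ps = pvJ (ps.take i) ++ '/' :: pvJ (ps.drop i) ∧
      pvPos ps i = (pvJ (ps.take i)).length + 1 := by
  induction ps generalizing i with
  | nil => simp at h
  | cons x t ih =>
    cases i with
    | zero => omega
    | succ k =>
      have hk : k < t.length := by simp at h; omega
      have ht : t ≠ [] := by intro e; subst e; simp at hk
      cases k with
      | zero =>
        have ht1 : List.take 1 (x :: t) = [x] := rfl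
        refine ⟨?_, ?_⟩
        · simp only [ht1, List.drop_succ_cons, List.drop_zero, pvJ_single]
          exact pvJ_cons x t ht
        · simp only [ht1, pvJ_single, pvPos]
      | succ m =>
        have h0' : 0 < m + 1 := by omega
        obtain ⟨ih1, ih2⟩ := ih (m + 1) h0' hk
        have htake : t.take (m + 1) ≠ [] := by
          have hl : 0 < (t.take (m + 1)).length := by
            rw [List.length_take]
            omega
          exact List.ne_nil_of_length_pos hl
        constructor
        · rw [pvJ_cons x t ht, ih1, List.take_succ_cons, pvJ_cons x _ htake,
            List.drop_succ_cons]
          simp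
        · rw [List.take_succ_cons, pvJ_cons x _ htake]
          simp only [pvPos, ih2, List.length_append, List.length_cons]
          omega

theorem pvDrop_pos (ps : List (List Char)) (i : Nat) (h : i < ps.length) :
    List.drop (pvPos ps i) (pvJ ps) = pvJ (ps.drop i) := by
  cases Nat.eq_zero_or_pos i with
  | inl h0 => subst h0; simp [pvPos]
  | inr h0 =>
    obtain ⟨h1, h2⟩ := pvJ_take_drop ps i h0 h
    rw [h1, h2]
    have : pvJ (ps.take i) ++ '/' :: pvJ (ps.drop i)
        = (pvJ (ps.take i) ++ ['/']) ++ pvJ (ps.drop i) := by simp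
    rw [this, List.drop_left' (by simp)]

theorem pvPos_succ (ps : List (List Char)) (i : Nat) (c : List Char) (rest : List (List Char))
    (h : ps.drop i = c :: rest) : pvPos ps (i + 1) = pvPos ps i + c.length + 1 := by
  induction ps generalizing i with
  | nil => simp at h
  | cons x t ih =>
    cases i with
    | zero =>
      simp only [List.drop_zero, List.cons.injEq] at h
      simp only [pvPos, h.1]
      omega
    | succ k =>
      have := ih (i := k) (by simpa using h)
      simp only [pvPos]
      omega

-- ---------- no occurrence of '/'-led patterns inside a '/'-free piece; no straddling ----------
theorem pvNoInside (pre x : List Char) (hx : '/' ∉ x) (k : Nat) :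
    ('/' :: pre).isPrefixOf (x.drop k) = false := by
  by_contra h
  rw [Bool.not_eq_false, List.isPrefixOf_iff_prefix] at h
  exact hx (List.mem_of_mem_drop (h.subset (by simp)))

theorem pvPfxAppend (pre d t : List Char) (hd : d ≠ []) (hpre : '/' ∉ pre) :
    ('/' :: pre).isPrefixOf (d ++ '/' :: t) = ('/' :: pre).isPrefixOf d := by
  rw [Bool.eq_iff_iff, List.isPrefixOf_iff_prefix, List.isPrefixOf_iff_prefix]
  constructor
  · intro h
    by_cases hlen : pre.length + 1 ≤ d.length
    · have h1 := List.prefix_iff_eq_take.mp h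
      simp only [List.length_cons] at h1
      rw [List.take_append_of_le_length hlen] at h1
      rw [h1]
      exact (List.take_prefix _ _).trans (List.prefix_refl d)
    · exfalso
      rw [not_le] at hlen
      have hi : d.length < ('/' :: pre).length := by simp only [List.length_cons]; omega
      have hge := h.getElem (i := d.length) hi
      have hr : (d ++ '/' :: t)[d.length]'(by simp) = '/' := by
        rw [List.getElem_append_right (le_refl d.length)]
        simp
      have hge2 : ('/' :: pre)[d.length]'hi = '/' := hge.trans hr
      cases d with
      | nil => exact hd rfl
      | cons a d' =>
        simp only [List.length_cons] at hge2
        rw [List.getElem_cons_succ] at hge2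
        exact hpre (hge2 ▸ List.getElem_mem _)
  · intro h
    exact h.trans (List.prefix_append d _)

theorem pvJ_concat (ys : List (List Char)) (x : List Char) (h : ys ≠ []) :
    pvJ (ys ++ [x]) = pvJ ys ++ '/' :: x := by
  induction ys with
  | nil => exact absurd rfl h
  | cons a t ih =>
    cases ht : t with
    | nil => subst ht; simp [pvJ, List.intercalate, List.intersperse]
    | cons b t' =>
      rw [← ht, List.cons_append, pvJ_cons a (t ++ [x]) (by simp), ih (by simp [ht]),
        pvJ_cons a t (by simp [ht])]
      simp

theorem pvPos_append (ys zs : List (List Char)) (i : Nat) (h : i ≤ ys.length) :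
    pvPos (ys ++ zs) i = pvPos ys i := by
  induction ys generalizing i with
  | nil =>
    have h0 : i = 0 := by simpa using h
    subst h0
    simp [pvPos]
  | cons y t ih =>
    cases i with
    | zero => simp [pvPos]
    | succ k =>
      simp only [List.cons_append, pvPos]
      rw [ih k (by simp at h; omega)]

theorem pvPos_concat_last (ys : List (List Char)) (x : List Char) (h : ys ≠ []) :
    pvPos (ys ++ [x]) ys.length = (pvJ ys).length + 1 := by
  have h0 : 0 < ys.length := List.length_pos_of_ne_nil h
  have hlt : ys.length < (ys ++ [x]).length := by simp
  have := (pvJ_take_drop (ys ++ [x]) ys.length h0 hlt).2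
  rwa [List.take_left] at this

-- ---------- main: rfind on '/'::pvJ ps finds exactly the last matching component ----------
theorem pvMain (pre : List Char) (hpre : '/' ∉ pre) (hne : pre ≠ []) :
    ∀ (ps : List (List Char)), (∀ x ∈ ps, '/' ∉ x) →
    (pvLastIdx ps pre = none →
      ∀ j : Nat, ('/' :: pre).isPrefixOf (List.drop j ('/' :: pvJ ps)) = false) ∧
    (∀ i, pvLastIdx ps pre = some i →
      ('/' :: pre).isPrefixOf (List.drop (pvPos ps i) ('/' :: pvJ ps)) = true ∧
      ∀ j : Nat, pvPos ps i < j → ('/' :: pre).isPrefixOf (List.drop j ('/' :: pvJ ps)) = false) := by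
  have hpl : 0 < pre.length := List.length_pos_of_ne_nil hne
  intro ps
  induction ps using List.reverseRecOn with
  | nil =>
    intro _
    constructor
    · intro _ j
      by_contra hcon
      rw [Bool.not_eq_false, List.isPrefixOf_iff_prefix] at hcon
      have hlen := hcon.length_le
      have hJ : pvJ ([] : List (List Char)) = [] := by simp [pvJ, List.intercalate]
      rw [hJ, List.length_drop] at hlen
      simp only [List.length_cons, List.length_nil] at hlen
      omega
    · intro i hi
      simp [pvLastIdx] at hi
  | append_singleton ys x ihind =>
    intro hfree
    have hfree' : ∀ y ∈ ys, '/' ∉ y := fun y hy => hfree y (by simp [hy])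
    have hx : '/' ∉ x := hfree x (by simp)
    by_cases hys : ys = []
    · subst hys
      simp only [List.nil_append]
      have hJx : pvJ [x] = x := pvJ_single x
      constructor
      · intro h j
        simp only [pvLastIdx] at h
        have hnp : pre.isPrefixOf x = false := by
          by_cases hp : pre.isPrefixOf x <;> simp [hp] at h ⊢
        cases j with
        | zero =>
          rw [hJx, List.drop_zero]
          simp [List.isPrefixOf, hnp]
        | succ k =>
          rw [hJx, List.drop_succ_cons]
          exact pvNoInside pre x hx k
      · intro i hi
        simp only [pvLastIdx] at hi
        by_cases hp : pre.isPrefixOf x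
        · simp only [hp, if_pos] at hi
          have hi0 : i = 0 := by simp at hi; omega
          subst hi0
          refine ⟨?_, ?_⟩
          · rw [hJx]
            simp only [pvPos, List.drop_zero]
            simp [List.isPrefixOf, hp]
          · intro j hj
            rw [hJx]
            cases j with
            | zero => omega
            | succ k =>
              rw [List.drop_succ_cons]
              exact pvNoInside pre x hx k
        · simp [hp] at hi
    · -- ys ≠ []
      have hJ : ('/' :: pvJ (ys ++ [x])) = ('/' :: pvJ ys) ++ '/' :: x := by
        rw [pvJ_concat ys x hys]
        simp
      have hLlen : ('/' :: pvJ ys).length = (pvJ ys).length + 1 := by simp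
      -- equivalence below the new separator
      have hE : ∀ j : Nat, j ≤ (pvJ ys).length →
          ('/' :: pre).isPrefixOf (List.drop j ('/' :: pvJ (ys ++ [x]))) =
            ('/' :: pre).isPrefixOf (List.drop j ('/' :: pvJ ys)) := by
        intro j hj
        rw [hJ, List.drop_append_of_le_length (by omega)]
        have hd : List.drop j ('/' :: pvJ ys) ≠ [] := by
          have : 0 < (List.drop j ('/' :: pvJ ys)).length := by
            rw [List.length_drop]
            omega
          exact List.ne_nil_of_length_pos this
        exact pvPfxAppend pre _ x hd hpre
      -- at the new separator
      have hAt : ('/' :: pre).isPrefixOf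
          (List.drop ((pvJ ys).length + 1) ('/' :: pvJ (ys ++ [x]))) = pre.isPrefixOf x := by
        rw [hJ, List.drop_left' (by simp)]
        simp [List.isPrefixOf]
      -- beyond the new separator
      have hBey : ∀ j : Nat, (pvJ ys).length + 1 < j →
          ('/' :: pre).isPrefixOf (List.drop j ('/' :: pvJ (ys ++ [x]))) = false := by
        intro j hj
        have hsplit : ('/' :: pvJ (ys ++ [x])) = (('/' :: pvJ ys) ++ ['/']) ++ x := by
          rw [hJ]; simp
        rw [hsplit, List.drop_append]
        have h1 : List.drop j (('/' :: pvJ ys) ++ ['/']) = [] := by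
          apply List.drop_eq_nil_of_le
          simp
          omega
        rw [h1, List.nil_append]
        have h2 : j - (('/' :: pvJ ys) ++ ['/']).length = j - (pvJ ys).length - 2 := by
          simp
          omega
        rw [h2]
        exact pvNoInside pre x hx _
      rw [pvLastIdx_concat]
      by_cases hp : pre.isPrefixOf x
      · -- last component matches: found at the new separator
        rw [if_pos hp]
        constructor
        · intro h; cases h
        · intro i hi
          have hieq : i = ys.length := by simp at hi; omega
          subst hieq
          rw [pvPos_concat_last ys x hys]
          refine ⟨by rw [hAt]; exact hp, ?_⟩
          intro j hj
          exact hBey j hj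
      · rw [if_neg hp]
        obtain ⟨ih1, ih2⟩ := ihind hfree'
        constructor
        · intro h j
          rcases Nat.lt_trichotomy j ((pvJ ys).length + 1) with h1 | h1 | h1
          · rw [hE j (by omega)]
            exact ih1 h j
          · subst h1
            rw [hAt]
            exact Bool.eq_false_iff.mpr hp
          · exact hBey j h1
        · intro i hi
          have hilt : i < ys.length := pvLastIdx_lt ys pre i hi
          have hple : pvPos ys i ≤ (pvJ ys).length := pvPos_le ys i hilt
          have hppos : pvPos (ys ++ [x]) i = pvPos ys i := pvPos_append ys [x] i (by omega)
          obtain ⟨g1, g2⟩ := ih2 i hi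
          rw [hppos]
          refine ⟨?_, ?_⟩
          · rw [hE (pvPos ys i) hple]
            exact g1
          · intro j hj
            rcases Nat.lt_trichotomy j ((pvJ ys).length + 1) with h1 | h1 | h1
            · rw [hE j (by omega)]
              exact g2 j hj
            · subst h1
              rw [hAt]
              exact Bool.eq_false_iff.mpr hp
            · exact hBey j h1

theorem pvRfind_eq (ps : List (List Char)) (pre : List Char)
    (hfree : ∀ x ∈ ps, '/' ∉ x) (hpre : '/' ∉ pre) (hne : pre ≠ []) :
    PySem.Chars.rfind ('/' :: pvJ ps) ('/' :: pre) =
      (pvLastIdx ps pre).elim (-1) (fun i => (pvPos ps i : Int)) := by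
  have H := pvMain pre hpre hne ps hfree
  cases h : pvLastIdx ps pre with
  | none =>
    have hall := H.1 h
    simp only [Option.elim]
    exact pvRgo_none ('/' :: pvJ ps) ('/' :: pre) _ (fun j _ => hall j)
  | some i =>
    obtain ⟨h1, h2⟩ := H.2 i h
    have hilt : i < ps.length := pvLastIdx_lt ps pre i h
    have hle : pvPos ps i ≤ ('/' :: pvJ ps).length := by
      have := pvPos_le ps i hilt
      simp only [List.length_cons]
      omega
    simp only [Option.elim]
    exact pvRgo_some ('/' :: pvJ ps) ('/' :: pre) (pvPos ps i) h1 _ hle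
      (fun j hj _ => h2 j hj)

-- ---------- find of '/' in a joined suffix ----------
theorem pvFind_free_none (c : List Char) (hc : '/' ∉ c) : PySem.Chars.find c ['/'] = -1 := by
  rw [PySem.Chars.find_eq_neg_one_iff]
  intro h
  exact hc (h.subset (by simp))

theorem pvFind_free_sep (c t : List Char) (hc : '/' ∉ c) :
    PySem.Chars.find (c ++ '/' :: t) ['/'] = (c.length : Int) := by
  have hinf : ['/'] <:+: (c ++ '/' :: t) := ⟨c, t, by simp⟩
  have h0 : 0 ≤ PySem.Chars.find (c ++ '/' :: t) ['/'] :=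
    (PySem.Chars.find_nonneg_iff _ _).mpr hinf
  obtain ⟨hp, hmin⟩ := PySem.Chars.find_spec h0
  have hub : (PySem.Chars.find (c ++ '/' :: t) ['/']).toNat ≤ c.length := by
    by_contra hcon
    rw [not_le] at hcon
    refine hmin c.length hcon ?_
    rw [List.drop_left]
    exact ⟨t, rfl⟩
  have hlb : ¬ (PySem.Chars.find (c ++ '/' :: t) ['/']).toNat < c.length := by
    intro hcon
    obtain ⟨u, hu⟩ := hp
    have hdrop : List.drop (PySem.Chars.find (c ++ '/' :: t) ['/']).toNat (c ++ '/' :: t)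
        = '/' :: u := by rw [← hu]; rfl
    have h9 : (c ++ '/' :: t)[(PySem.Chars.find (c ++ '/' :: t) ['/']).toNat + 0]? = some '/' := by
      rw [← List.getElem?_drop, hdrop]
      rfl
    rw [Nat.add_zero, List.getElem?_append_left hcon] at h9
    exact hc (List.mem_of_getElem? h9)
  have : (PySem.Chars.find (c ++ '/' :: t) ['/']).toNat = c.length := by omega
  omega

-- ---------- A's fused forward scan, reduced to pvLastIdx ----------
def pvLast (parts : List String) (pre : String) (s : Int) (a : Option Int) : Option Int :=
  (PySem.List.enumerate parts s).foldl
    (fun acc is => if PySem.Str.startswith is.2 pre then some is.1 else acc) a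

theorem pv_enumerate_concat {α : Type} (xs : List α) (x : α) (s : Int) :
    PySem.List.enumerate (xs ++ [x]) s = PySem.List.enumerate xs s ++ [(s + xs.length, x)] := by
  induction xs generalizing s with
  | nil => simp [PySem.List.enumerate_nil, PySem.List.enumerate_cons]
  | cons y ys ih =>
    simp only [List.cons_append, PySem.List.enumerate_cons, ih, List.length_cons]
    congr 3
    push_cast
    ring_nf

theorem pvLast_concat (ys : List String) (x : String) (pre : String) :
    pvLast (ys ++ [x]) pre 0 none =
      if PySem.Str.startswith x pre then some (ys.length : Int) else pvLast ys pre 0 none := by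
  unfold pvLast
  rw [pv_enumerate_concat, List.foldl_append]
  simp [List.foldl]

theorem pvLast_eq_lastIdx (pieces : List (List Char)) (pre : String) :
    pvLast (pieces.map String.ofList) pre 0 none =
      (pvLastIdx pieces pre.toList).map (fun i => (i : Int)) := by
  induction pieces using List.reverseRecOn with
  | nil => simp [pvLast, PySem.List.enumerate_nil, pvLastIdx]
  | append_singleton ys x ih =>
    rw [List.map_append, List.map_singleton, pvLast_concat, pvLastIdx_concat]
    have hsw : PySem.Str.startswith (String.ofList x) pre = pre.toList.isPrefixOf x := by
      simp [PySem.Str.startswith_eq, PySem.Chars.startswith]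
    rw [hsw]
    by_cases h : pre.toList.isPrefixOf x <;> simp [h, ih]

-- ---------- assembling ----------
theorem pvJoin_take (pieces : List (List Char)) (k : Nat) :
    PySem.Str.join "/" (List.take k (pieces.map String.ofList)) =
      String.ofList (pvJ (pieces.take k)) := by
  have hmm : ∀ (l : List (List Char)), List.map String.toList (List.map String.ofList l) = l := by
    intro l
    induction l with
    | nil => rfl
    | cons a t ih => simp [ih]
  simp [PySem.Str.join, PySem.Chars.join, pvJ, ← List.map_take, hmm]

-- B's "p.find('/', ti) then p[:j] (or p itself)" computes the join of the first i+1 components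
theorem pvSuffixSlice (pieces : List (List Char)) (i : Nat)
    (hfree : ∀ x ∈ pieces, '/' ∉ x) (hilt : i < pieces.length) :
    (if PySem.Chars.findFrom (pvJ pieces) ['/'] ((pvPos pieces i : Nat) : Int) none < 0
     then String.ofList (pvJ pieces)
     else String.ofList (PySem.List.slice (pvJ pieces) none
            (some (PySem.Chars.findFrom (pvJ pieces) ['/'] ((pvPos pieces i : Nat) : Int) none))))
    = String.ofList (pvJ (pieces.take (i + 1))) := by
  have hple : pvPos pieces i ≤ (pvJ pieces).length := pvPos_le pieces i hilt
  rw [PySem.Chars.findFrom_natCast (pvJ pieces) ['/'] (pvPos pieces i) hple,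
    pvDrop_pos pieces i hilt]
  have hdropc : pieces.drop i = pieces[i] :: pieces.drop (i + 1) := List.drop_eq_getElem_cons hilt
  have hcfree : '/' ∉ pieces[i] := hfree _ (List.getElem_mem hilt)
  by_cases hrest : pieces.drop (i + 1) = []
  · have hJd : pvJ (pieces.drop i) = pieces[i] := by rw [hdropc, hrest, pvJ_single]
    rw [hJd, pvFind_free_none _ hcfree]
    have hlen : pieces.length ≤ i + 1 := by
      have := congrArg List.length hrest
      simp only [List.length_drop, List.length_nil] at this
      omega
    rw [List.take_of_length_le hlen]
    norm_num
  · have hJd : pvJ (pieces.drop i) = pieces[i] ++ '/' :: pvJ (pieces.drop (i + 1)) := by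
      rw [hdropc, pvJ_cons _ _ hrest]
    rw [hJd, pvFind_free_sep _ _ hcfree]
    rw [if_neg (by omega : ¬ ((pieces[i].length : Int) = -1))]
    rw [if_neg (by omega : ¬ ((pvPos pieces i : Int) + (pieces[i].length : Int) < 0))]
    rw [PySem.List.slice_to _ (by omega : (0:Int) ≤ (pvPos pieces i : Int) + (pieces[i].length : Int))]
    congr 1
    have hi1 : i + 1 < pieces.length := by
      by_contra hcon
      rw [not_lt] at hcon
      exact hrest (List.drop_eq_nil_of_le hcon)
    obtain ⟨e1, e2⟩ := pvJ_take_drop pieces (i + 1) (by omega) hi1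
    have hsucc : pvPos pieces (i + 1) = pvPos pieces i + pieces[i].length + 1 :=
      pvPos_succ pieces i pieces[i] (pieces.drop (i + 1)) hdropc
    have htn : ((pvPos pieces i : Int) + (pieces[i].length : Int)).toNat
        = (pvJ (pieces.take (i + 1))).length := by omega
    rw [htn, e1, List.take_left' rfl]

set_option maxHeartbeats 1000000 in
theorem pv_ports_agree (clip_dir : String) :
    parse_ids_from_clip_dir clip_dir = parse_ids_from_clip_dir_alt clip_dir := by
  have htr : '/' ∉ "track_".toList := by decide
  have hcl : '/' ∉ "clip_".toList := by decide
  have htr2 : "track_".toList ≠ [] := by decide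
  have hcl2 : "clip_".toList ≠ [] := by decide
  set P := pvNorm clip_dir with hPdef
  set pieces := pvGs P.toList [] with hpieces
  have hJcs : pvJ pieces = P.toList := by
    rw [hpieces]
    simpa using pvGs_join P.toList []
  have hfree : ∀ x ∈ pieces, '/' ∉ x := fun x hx => pvGs_free P.toList [] x (by simp) hx
  have hparts : pvParts clip_dir = pieces.map String.ofList := by
    rw [pvParts, PySem.Str.split?, ← hPdef]
    have hsep : ("/" : String).toList = ['/'] := rfl
    rw [hsep, PySem.Chars.split?]
    simp [pvSplitOn_eq, hpieces]
  have hPo : String.ofList (pvJ pieces) = P := by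
    rw [hJcs, String.ofList_toList]
  simp only [parse_ids_from_clip_dir, parse_ids_from_clip_dir_alt]
  rw [PySem.List.foldl_prod_mk
    (fun acc (is : Int × String) => if PySem.Str.startswith is.2 "track_" then some is.1 else acc)
    (fun acc (is : Int × String) => if PySem.Str.startswith is.2 "clip_" then some is.1 else acc)]
  rw [show (PySem.List.enumerate (pvParts clip_dir)).foldl
        (fun acc (is : Int × String) => if PySem.Str.startswith is.2 "track_" then some is.1 else acc) none
      = pvLast (pvParts clip_dir) "track_" 0 none from rfl,
    show (PySem.List.enumerate (pvParts clip_dir)).foldl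
        (fun acc (is : Int × String) => if PySem.Str.startswith is.2 "clip_" then some is.1 else acc) none
      = pvLast (pvParts clip_dir) "clip_" 0 none from rfl,
    hparts, pvLast_eq_lastIdx pieces "track_", pvLast_eq_lastIdx pieces "clip_"]
  rw [show ("/track_".toList) = '/' :: "track_".toList from rfl,
    show ("/clip_".toList) = '/' :: "clip_".toList from rfl]
  rw [show (P.toList) = pvJ pieces from hJcs.symm]
  rw [pvRfind_eq pieces "track_".toList hfree htr htr2,
    pvRfind_eq pieces "clip_".toList hfree hcl hcl2]
  cases htI : pvLastIdx pieces "track_".toList with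
  | none =>
    simp only [Option.bind_eq_bind, Option.bind, Option.map_none, Option.elim_none]
    rw [if_pos (by norm_num : (-1 : Int) < 0)]
  | some i =>
    have hilt : i < pieces.length := pvLastIdx_lt pieces _ i htI
    rw [← hPdef, show ("/" : String).toList = ['/'] from rfl]
    simp only [Option.bind_eq_bind, Option.bind, Option.elim_some]
    rw [if_neg (by omega : ¬ ((pvPos pieces i : Int) < 0))]
    have hvid : PySem.Str.join "/" (PySem.List.slice (pieces.map String.ofList) none (some ((i : Int)))) =
        (if (pvPos pieces i : Int) > 0
         then String.ofList (PySem.List.slice (pvJ pieces) none (some ((pvPos pieces i : Int) - 1)))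
         else "") := by
      rw [PySem.List.slice_to _ (by omega : (0:Int) ≤ (i : Int))]
      rw [show ((i : Int)).toNat = i from Int.toNat_natCast i]
      rw [pvJoin_take]
      by_cases hi0 : i = 0
      · subst hi0
        rw [if_neg (by simp [pvPos])]
        rfl
      · have h0i : 0 < i := Nat.pos_of_ne_zero hi0
        obtain ⟨e1, e2⟩ := pvJ_take_drop pieces i h0i hilt
        rw [if_pos (by omega : (pvPos pieces i : Int) > 0)]
        rw [PySem.List.slice_to _ (by omega : (0:Int) ≤ (pvPos pieces i : Int) - 1)]
        have htn : ((pvPos pieces i : Int) - 1).toNat = (pvJ (pieces.take i)).length := by omega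
        rw [htn, e1, List.take_left' rfl]
    have htrk : ∀ (m : Nat), m < pieces.length →
        (if PySem.Chars.findFrom (pvJ pieces) ['/'] ((pvPos pieces m : Nat) : Int) none < 0
         then P
         else String.ofList (PySem.List.slice (pvJ pieces) none
                (some (PySem.Chars.findFrom (pvJ pieces) ['/'] ((pvPos pieces m : Nat) : Int) none))))
        = PySem.Str.join "/" (PySem.List.slice (pieces.map String.ofList) none (some ((m : Int) + 1))) := by
      intro m hm
      rw [PySem.List.slice_to _ (by omega : (0:Int) ≤ (m : Int) + 1)]
      rw [show ((m : Int) + 1).toNat = m + 1 by omega]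
      rw [pvJoin_take, ← hPo, pvSuffixSlice pieces m hfree hm]
    refine congrArg₂ Prod.mk hvid (congrArg₂ Prod.mk (htrk i hilt).symm ?_)
    cases hcI : pvLastIdx pieces "clip_".toList with
    | none =>
      simp only [Option.bind_eq_bind, Option.bind, Option.map_none, Option.elim_none]
      rw [if_pos (by norm_num : (-1 : Int) < 0)]
    | some i' =>
      have hilt' : i' < pieces.length := pvLastIdx_lt pieces _ i' hcI
      simp only [Option.bind_eq_bind, Option.bind, Option.elim_some]
      rw [if_neg (by omega : ¬ ((pvPos pieces i' : Int) < 0))]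
      exact (htrk i' hilt').symm

-- ===== VERDICT (by name: the statement is the Claim_ definition above) =====
theorem parse_ids_from_clip_dir_spec : Claim_equal_parse_ids_from_clip_dir := by
  intro clip_dir _ _
  exact pv_ports_agree clip_dir
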